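-- pv_equiv track=rewrite | github.com/hedgehog-hg/OperatingSystem | codeSignal/loopTunnel.py | lineup
-- ===== SOURCE A (Python) =====
-- def lineup(commands):
--     l = 1
--     r = 1
--     cnt =0
--     for order in commands:
--         if order =='L':
--             l*=1
--             r*=-1
--         elif order =='R':
--             l*=-1
--             r*=1
--         if l == r : cnt+=1
--
--     return cnt
-- ===== SOURCE B (Python) =====
-- def lineup(commands):
--     # Two passes: build the running count of L/R commands, then count even prefixes.
--     running = []
--     t = 0
--     for o in commands:
--         if o == 'L' or o == 'R':
--             t += 1
--         running.append(t)
--     return sum(1 for c in running if c % 2 == 0)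
-- ===== Notes on version B (the rewrite author's own statement) =====
-- stated objective: idiomatic
-- what changed: Replaces the fused loop over two multiplicative +/-1 signs by two passes: build the running count of 'L'/'R' commands, then count how many running values are even (l==r holds exactly at even parity).
import Mathlib
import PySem

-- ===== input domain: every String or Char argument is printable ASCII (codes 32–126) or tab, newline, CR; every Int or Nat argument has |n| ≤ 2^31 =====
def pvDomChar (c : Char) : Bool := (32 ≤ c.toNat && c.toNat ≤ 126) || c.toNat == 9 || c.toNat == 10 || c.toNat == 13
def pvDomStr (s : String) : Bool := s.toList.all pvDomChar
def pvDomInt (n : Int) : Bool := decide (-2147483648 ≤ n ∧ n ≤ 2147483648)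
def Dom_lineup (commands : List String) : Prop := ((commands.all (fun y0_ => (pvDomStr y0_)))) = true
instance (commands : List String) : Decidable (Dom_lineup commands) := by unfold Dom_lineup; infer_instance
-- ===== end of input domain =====

-- B builds the running count of 'L'/'R' commands in one pass, then counts even values in a second pass (same O(n) cost, idiomatic two-pass shape).


-- ===== PORT A =====
-- the for-loop over (l, r, cnt)
def lineupGo : List String → Int → Int → Int → Int
  | [], _, _, cnt => cnt
  | o :: rest, l, r, cnt =>
    if o = "L" then
      lineupGo rest (l * 1) (r * (-1)) (if l * 1 = r * (-1) then cnt + 1 else cnt)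
    else if o = "R" then
      lineupGo rest (l * (-1)) (r * 1) (if l * (-1) = r * 1 then cnt + 1 else cnt)
    else
      lineupGo rest l r (if l = r then cnt + 1 else cnt)

def lineup (commands : List String) : Int := lineupGo commands 1 1 0

-- ===== PORT B =====
-- first pass: build the list of running counts t
def lineupRun : List String → Int → List Int → List Int
  | [], _, running => running
  | o :: rest, t, running =>
    let t' := if o = "L" ∨ o = "R" then t + 1 else t
    lineupRun rest t' (running ++ [t'])

-- second pass: sum(1 for c in running if c % 2 == 0)
def lineupSumEv (running : List Int) : Int :=
  running.foldl (fun a c => a + if c % 2 = 0 then 1 else 0) 0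

def lineup_alt (commands : List String) : Int :=
  lineupSumEv (lineupRun commands 0 [])

-- ===== PRECONDITION & SPEC =====
def Spec_lineup (commands : List String) (out : Int) : Prop := out = lineup_alt commands
instance (commands : List String) (out : Int) : Decidable (Spec_lineup commands out) := by unfold Spec_lineup; infer_instance

-- ===== CLAIM (what is proved, stated in full; the proofs are below) =====
def Claim_equal_lineup : Prop := ∀ (commands : List String), Dom_lineup commands → Spec_lineup commands (lineup commands)

-- ===== LEMMAS AND PROOFS =====

-- the even-prefix count, phrased as one recursion (bridges both ports)
def lineupCnt : List String → Int → Int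
  | [], _ => 0
  | o :: rest, t =>
    let t' := if o = "L" ∨ o = "R" then t + 1 else t
    (if t' % 2 = 0 then 1 else 0) + lineupCnt rest t'

theorem lineupRun_cnt (cmds : List String) (t : Int) (run : List Int) :
    lineupSumEv (lineupRun cmds t run) = lineupSumEv run + lineupCnt cmds t := by
  induction cmds generalizing t run with
  | nil => simp [lineupRun, lineupCnt]
  | cons o rest ih =>
    simp only [lineupRun, lineupCnt]
    rw [ih]
    have : lineupSumEv (run ++ [if o = "L" ∨ o = "R" then t + 1 else t])
        = lineupSumEv run + (if (if o = "L" ∨ o = "R" then t + 1 else t) % 2 = 0 then 1 else 0) := by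
      simp only [lineupSumEv, List.foldl_append, List.foldl_cons, List.foldl_nil]
    rw [this]; ring

theorem lineupGo_cnt (cmds : List String) (l r cnt t : Int)
    (hl : l = 1 ∨ l = -1) (hr : r = 1 ∨ r = -1)
    (hp : (l = r) ↔ (t % 2 = 0)) :
    lineupGo cmds l r cnt = cnt + lineupCnt cmds t := by
  induction cmds generalizing l r cnt t with
  | nil => simp [lineupGo, lineupCnt]
  | cons o rest ih =>
    by_cases hL : o = "L"
    · subst hL
      show lineupGo rest (l * 1) (r * (-1)) (if l * 1 = r * (-1) then cnt + 1 else cnt)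
          = cnt + ((if (t + 1) % 2 = 0 then 1 else 0) + lineupCnt rest (t + 1))
      have hp' : (l * 1 = r * (-1)) ↔ ((t + 1) % 2 = 0) := by
        rcases hl with rfl | rfl <;> rcases hr with rfl | rfl <;> simp_all <;> omega
      rw [ih (l * 1) (r * (-1)) _ (t + 1)
        (by rcases hl with rfl | rfl <;> norm_num)
        (by rcases hr with rfl | rfl <;> norm_num) hp',
        if_congr hp' rfl rfl]
      split_ifs <;> ring
    · by_cases hR : o = "R"
      · subst hR
        show lineupGo rest (l * (-1)) (r * 1) (if l * (-1) = r * 1 then cnt + 1 else cnt)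
            = cnt + ((if (t + 1) % 2 = 0 then 1 else 0) + lineupCnt rest (t + 1))
        have hp' : (l * (-1) = r * 1) ↔ ((t + 1) % 2 = 0) := by
          rcases hl with rfl | rfl <;> rcases hr with rfl | rfl <;> simp_all <;> omega
        rw [ih (l * (-1)) (r * 1) _ (t + 1)
          (by rcases hl with rfl | rfl <;> norm_num)
          (by rcases hr with rfl | rfl <;> norm_num) hp',
          if_congr hp' rfl rfl]
        split_ifs <;> ring
      · have hor : ¬(o = "L" ∨ o = "R") := by simp [hL, hR]
        simp only [lineupGo, lineupCnt, if_neg hL, if_neg hR, if_neg hor]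
        rw [ih l r _ t hl hr hp, if_congr hp rfl rfl]
        split_ifs <;> ring

-- ===== VERDICT (by name: the statement is the Claim_ definition above) =====
theorem lineup_spec : Claim_equal_lineup := by
  intro commands _
  show lineup commands = lineup_alt commands
  rw [lineup, lineup_alt, lineupRun_cnt,
    lineupGo_cnt commands 1 1 0 0 (Or.inl rfl) (Or.inl rfl) (by norm_num)]
  simp [lineupSumEv]
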